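-- pv_equiv track=rewrite | github.com/neoboid/git-p4son | git_p4son/perforce.py | replace_description_in_spec
-- ===== SOURCE A (Python) =====
-- def find_line_starting_with(lines: list[str], prefix: str) -> int:
--     """Find the index of the first line starting with prefix, or len(lines) if not found."""
--     for i, line in enumerate(lines):
--         if line.startswith(prefix):
--             return i
--     return len(lines)
--
-- def find_end_of_indented_section(lines: list[str], start: int) -> int:
--     """Find the end of a tab-indented section starting at the given index."""
--     i = start
--     while i < len(lines) and lines[i].startswith('\t'):
--         i += 1
--     return i
--
-- def replace_description_in_spec(spec_text: str, new_description_lines: list[str]) -> str: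
--     """Replace the Description field in a p4 changelist spec."""
--     lines = spec_text.splitlines()
--     desc_line = find_line_starting_with(lines, 'Description:')
--
--     if desc_line >= len(lines):
--         return spec_text
--
--     desc_end = find_end_of_indented_section(lines, desc_line + 1)
--
--     result_lines = lines[:desc_line + 1]
--     result_lines.extend('\t' + line for line in new_description_lines)
--     result_lines.extend(lines[desc_end:])
--
--     return '\n'.join(result_lines) + '\n'
-- ===== SOURCE B (Python) =====
-- def replace_description_in_spec(spec_text: str, new_description_lines: list[str]) -> str:
--     """Replace the Description field in a p4 changelist spec (single pass)."""
--     result = []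
--     replaced = False
--     skipping = False
--     for line in spec_text.splitlines():
--         if not replaced and line.startswith('Description:'):
--             result.append(line)
--             result.extend('\t' + l for l in new_description_lines)
--             replaced = True
--             skipping = True
--         elif skipping and line.startswith('\t'):
--             pass
--         else:
--             skipping = False
--             result.append(line)
--     if not replaced:
--         return spec_text
--     return '\n'.join(result) + '\n'
-- ===== Notes on version B (the rewrite author's own statement) =====
-- stated objective: alternative
-- what changed: B replaces the two index-finding helpers plus list slicing with a single state-machine pass over the lines (replaced/skipping flags) that builds the result list directly.
import Mathlib
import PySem

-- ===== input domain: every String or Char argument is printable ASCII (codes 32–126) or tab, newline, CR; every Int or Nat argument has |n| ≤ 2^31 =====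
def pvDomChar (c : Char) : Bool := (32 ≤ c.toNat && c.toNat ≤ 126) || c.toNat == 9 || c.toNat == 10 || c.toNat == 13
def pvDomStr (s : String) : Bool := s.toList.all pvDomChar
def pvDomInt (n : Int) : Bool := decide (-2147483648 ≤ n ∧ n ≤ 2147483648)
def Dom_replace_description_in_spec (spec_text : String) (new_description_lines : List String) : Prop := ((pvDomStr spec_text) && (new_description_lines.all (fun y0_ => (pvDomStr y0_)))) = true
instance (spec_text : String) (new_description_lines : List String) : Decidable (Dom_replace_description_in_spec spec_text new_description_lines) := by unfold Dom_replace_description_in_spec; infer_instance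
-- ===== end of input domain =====

-- B replaces A's two index-finding helpers plus list slicing by a single
-- state-machine pass over the lines (alternative decomposition, same cost).

-- ===== PORT A =====
-- find_line_starting_with: index of first line starting with prefix, or len(lines)
def pvFindLineStartingWith (lines : List String) (pre : String) : Nat :=
  match lines with
  | [] => 0
  | l :: ls => if PySem.Str.startswith l pre then 0 else 1 + pvFindLineStartingWith ls pre

-- find_end_of_indented_section's while-loop: number of leading '\t'-lines from `start`
def pvTabRun (lines : List String) : Nat :=
  match lines with
  | [] => 0
  | l :: ls => if PySem.Str.startswith l "\t" then 1 + pvTabRun ls else 0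

def pvFindEndOfIndentedSection (lines : List String) (start : Nat) : Nat :=
  start + pvTabRun (lines.drop start)

def replace_description_in_spec (spec_text : String) (new_description_lines : List String) : String :=
  let lines := PySem.Str.splitlines spec_text
  let desc_line := pvFindLineStartingWith lines "Description:"
  if desc_line ≥ lines.length then
    spec_text
  else
    let desc_end := pvFindEndOfIndentedSection lines (desc_line + 1)
    let result_lines := lines.take (desc_line + 1)
      ++ new_description_lines.map (fun line => "\t" ++ line)
      ++ lines.drop desc_end
    PySem.Str.join "\n" result_lines ++ "\n"

-- ===== PORT B =====
-- the for-loop of Source B as structural recursion over the lines, carrying the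
-- (replaced, skipping) flags; returns (replaced, result_lines)
def pvBLoop (new : List String) (lines : List String) (replaced skipping : Bool) :
    Bool × List String :=
  match lines with
  | [] => (replaced, [])
  | l :: ls =>
    if !replaced && PySem.Str.startswith l "Description:" then
      let r := pvBLoop new ls true true
      (r.1, l :: new.map (fun x => "\t" ++ x) ++ r.2)
    else if skipping && PySem.Str.startswith l "\t" then
      pvBLoop new ls replaced skipping
    else
      let r := pvBLoop new ls replaced false
      (r.1, l :: r.2)

def replace_description_in_spec_alt (spec_text : String) (new_description_lines : List String) : String :=
  let r := pvBLoop new_description_lines (PySem.Str.splitlines spec_text) false false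
  if !r.1 then spec_text
  else PySem.Str.join "\n" r.2 ++ "\n"

-- ===== PRECONDITION & SPEC =====
def Spec_replace_description_in_spec (spec_text : String) (new_description_lines : List String) (out : String) : Prop := out = replace_description_in_spec_alt spec_text new_description_lines
instance (spec_text : String) (new_description_lines : List String) (out : String) : Decidable (Spec_replace_description_in_spec spec_text new_description_lines out) := by unfold Spec_replace_description_in_spec; infer_instance

-- ===== CLAIM (what is proved, stated in full; the proofs are below) =====
def Claim_equal_replace_description_in_spec : Prop := ∀ (spec_text : String) (new_description_lines : List String), Dom_replace_description_in_spec spec_text new_description_lines → Spec_replace_description_in_spec spec_text new_description_lines (replace_description_in_spec spec_text new_description_lines)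

-- ===== LEMMAS AND PROOFS =====

-- state (replaced = true, skipping = false): every remaining line is kept
theorem pvBLoop_true_false (new : List String) (ls : List String) :
    pvBLoop new ls true false = (true, ls) := by
  induction ls with
  | nil => rfl
  | cons l ls ih => simp [pvBLoop, ih]

-- state (replaced = true, skipping = true): the leading tab-run is dropped
theorem pvBLoop_true_true (new : List String) (ls : List String) :
    pvBLoop new ls true true = (true, ls.drop (pvTabRun ls)) := by
  induction ls with
  | nil => rfl
  | cons l ls ih =>
    by_cases h : PySem.Chars.startswith l.toList ['\t'] = true
    · simp [pvBLoop, PySem.Str.startswith, h, ih, pvTabRun, Nat.add_comm 1 (pvTabRun ls)]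
    · simp [pvBLoop, PySem.Str.startswith, h, pvTabRun, pvBLoop_true_false]

-- initial state, characterised through A's helpers
theorem pvBLoop_false_false (new : List String) (ls : List String) :
    pvBLoop new ls false false =
      (if pvFindLineStartingWith ls "Description:" ≥ ls.length then (false, ls)
       else
        let d := pvFindLineStartingWith ls "Description:"
        (true, ls.take (d + 1) ++ new.map (fun x => "\t" ++ x)
          ++ (ls.drop (d + 1)).drop (pvTabRun (ls.drop (d + 1))))) := by
  induction ls with
  | nil => rfl
  | cons l ls ih =>
    by_cases h : PySem.Chars.startswith l.toList
        ['D', 'e', 's', 'c', 'r', 'i', 'p', 't', 'i', 'o', 'n', ':'] = true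
    · have h0 : pvFindLineStartingWith (l :: ls) "Description:" = 0 := by
        simp [pvFindLineStartingWith, PySem.Str.startswith, h]
      have hlt : ¬ pvFindLineStartingWith (l :: ls) "Description:" ≥ (l :: ls).length := by
        simp [h0]
      simp [pvBLoop, PySem.Str.startswith, h, pvBLoop_true_true, h0]
    · have hstep : pvFindLineStartingWith (l :: ls) "Description:"
          = 1 + pvFindLineStartingWith ls "Description:" := by
        simp [pvFindLineStartingWith, PySem.Str.startswith, h]
      simp only [pvBLoop, PySem.Str.startswith, Bool.not_false, Bool.true_and, Bool.false_and]
      rw [if_neg (by simpa using h), if_neg (by simp)]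
      simp only [ih]
      by_cases hge : pvFindLineStartingWith ls "Description:" ≥ ls.length
      · have hall : pvFindLineStartingWith (l :: ls) "Description:" ≥ (l :: ls).length := by
          simp only [hstep, List.length_cons]; omega
        rw [if_pos hge, if_pos hall]
      · have hge' : ¬ pvFindLineStartingWith (l :: ls) "Description:" ≥ (l :: ls).length := by
          simp only [hstep, List.length_cons]; omega
        rw [if_neg hge, if_neg hge']
        simp [hstep, Nat.add_comm 1 (pvFindLineStartingWith ls "Description:"),
          List.take_succ_cons, List.drop_succ_cons]

-- ===== VERDICT (by name: the statement is the Claim_ definition above) =====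
theorem replace_description_in_spec_spec : Claim_equal_replace_description_in_spec := by
  intro spec_text new_description_lines _
  unfold Spec_replace_description_in_spec replace_description_in_spec replace_description_in_spec_alt
  simp only [pvBLoop_false_false, pvFindEndOfIndentedSection]
  by_cases hge : pvFindLineStartingWith (PySem.Str.splitlines spec_text) "Description:"
      ≥ (PySem.Str.splitlines spec_text).length
  · simp [hge]
  · simp only [if_neg hge]
    have hdd : ∀ (xs : List String) (n m : Nat), xs.drop (n + m) = (xs.drop n).drop m := by
      intro xs n m
      rw [List.drop_drop, Nat.add_comm]
    rw [if_neg (by simp)]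
    rw [hdd]
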